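-- pv_equiv track=rewrite | github.com/Fybre/parsely-invoices | pipeline/extractor.py | _expand_stacked_row
-- ===== SOURCE A (Python) =====
-- def _expand_stacked_row(row: dict) -> list[dict]:
--     """
--     Detect rows where cells contain newline-separated stacked values and
--     expand them into individual rows.  Returns [row] unchanged when no
--     stacking is found (the common case — zero overhead).
--     """
--     if not row:
--         return [row]
--     max_parts = max(
--         (len(str(v).split('\n')) for v in row.values() if v is not None),
--         default=1,
--     )
--     if max_parts <= 1:
--         return [row]
--
--     keys = list(row.keys())
--     split_vals = [
--         str(row[k]).split('\n') if row.get(k) is not None else []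
--         for k in keys
--     ]
--     return [
--         {key: (split_vals[j][i].strip() if i < len(split_vals[j]) else '')
--          for j, key in enumerate(keys)}
--         for i in range(max_parts)
--     ]
-- ===== SOURCE B (Python) =====
-- def _expand_stacked_row(row: dict) -> list[dict]:
--     """Expand newline-stacked cells by recursively peeling the first line off
--     every column until all columns are exhausted (no height precomputation)."""
--     if not row:
--         return [row]
--     if not any(v is not None and '\n' in str(v) for v in row.values()):
--         return [row]
--     keys = list(row.keys())
--     cols = [[] if v is None else str(v).split('\n') for v in row.values()]
--
--     def peel(cols):
--         if all(not c for c in cols):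
--             return []
--         head = {k: (c[0].strip() if c else '') for k, c in zip(keys, cols)}
--         return [head] + peel([c[1:] for c in cols])
--
--     return peel(cols)
-- ===== Notes on version B (the rewrite author's own statement) =====
-- stated objective: alternative
-- what changed: B drops A's max_parts height computation and (i,j) bounds-checked indexing entirely: it guards by checking whether any value contains a newline, then builds the output by recursively peeling the first line off every column until all columns are exhausted, so no row count or padding is ever computed.
-- outside the precondition, e.g. on _expand_stacked_row({'a': None}): A returns [{'a': None}], B returns [{'a': None}]
import Mathlib
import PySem

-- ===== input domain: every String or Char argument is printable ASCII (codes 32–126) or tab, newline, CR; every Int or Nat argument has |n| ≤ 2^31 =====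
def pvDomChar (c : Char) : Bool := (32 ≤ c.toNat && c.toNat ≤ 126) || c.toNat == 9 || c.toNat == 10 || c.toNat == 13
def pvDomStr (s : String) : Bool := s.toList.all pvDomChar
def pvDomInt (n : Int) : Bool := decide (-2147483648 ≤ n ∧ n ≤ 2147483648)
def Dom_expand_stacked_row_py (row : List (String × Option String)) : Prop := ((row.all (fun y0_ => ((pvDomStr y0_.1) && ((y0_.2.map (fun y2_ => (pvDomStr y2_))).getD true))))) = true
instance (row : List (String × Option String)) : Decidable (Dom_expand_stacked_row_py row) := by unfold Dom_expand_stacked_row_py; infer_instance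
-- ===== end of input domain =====

-- B replaces A's max_parts height computation and (i,j)-indexed dict comprehension by a
-- newline-membership guard plus a recursion that peels the first line off every column
-- until all columns are exhausted. Equivalence is about the RETURN value (no mutation).

-- ===== PORT A =====
def expand_stacked_row_py (row : List (String × Option String)) : List (List (String × String)) :=
  -- 'if not row: return [row]'
  if row.isEmpty then [row.map (fun p => (p.1, p.2.getD ""))]
  else
    -- max((len(str(v).split('\n')) for v in row.values() if v is not None), default=1)
    let lens : List Int :=
      (PySem.Dict.mk row).values.filterMap (fun v =>
        v.map (fun s => (((PySem.Str.split? s "\n").getD []).length : Int)))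
    let max_parts : Int :=
      match PySem.List.max? lens (fun x => x) with
      | some m => m
      | none => 1
    if max_parts ≤ 1 then
      -- 'return [row]'; a None value is rendered via getD "" — under Pre_ this branch has no None values
      [row.map (fun p => (p.1, p.2.getD ""))]
    else
      let keys : List String := (PySem.Dict.mk row).keys
      let split_vals : List (List String) := keys.map (fun k =>
        match (PySem.Dict.mk row).get? k with
        | some (some v) => (PySem.Str.split? v "\n").getD []
        | _ => [])
      (PySem.List.pyRange 0 max_parts 1).map (fun i =>
        (PySem.List.enumerate keys).map (fun jk =>
          (jk.2,
            if i < ((PySem.List.pyGetD split_vals jk.1 []).length : Int) then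
              PySem.Str.strip (PySem.List.pyGetD (PySem.List.pyGetD split_vals jk.1 []) i "")
            else "")))

-- ===== PORT B =====
-- helper lemma needed by pvPeel's termination proof (cited in decreasing_by)
theorem pvSumTailLt (cols : List (List String)) (h : ∃ c ∈ cols, c ≠ []) :
    ((cols.map (fun c => c.tail)).map List.length).sum < (cols.map List.length).sum := by
  induction cols with
  | nil => simp at h
  | cons c cs ih =>
    simp only [List.map_cons, List.sum_cons]
    by_cases hc : c = []
    · subst hc
      obtain ⟨d, hd, hdne⟩ := h
      rcases List.mem_cons.mp hd with rfl | hd'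
      · exact absurd rfl hdne
      · have := ih ⟨d, hd', hdne⟩; simpa using this
    · have h1 : c.tail.length < c.length := by
        cases c with
        | nil => exact absurd rfl hc
        | cons a t => simp
      have h2 : ((cs.map (fun c => c.tail)).map List.length).sum ≤ (cs.map List.length).sum := by
        clear ih h hc h1
        induction cs with
        | nil => simp
        | cons d ds ihd =>
          simp only [List.map_cons, List.sum_cons]
          have : d.tail.length ≤ d.length := by cases d <;> simp
          omega
      omega

-- peel(cols): if all columns empty stop, else emit the heads (stripped, '' for an
-- exhausted column) and recurse on the tails
def pvPeel (keys : List String) (cols : List (List String)) : List (List (String × String)) :=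
  if cols.all (fun c => c.isEmpty) then []
  else
    ((keys.zip cols).map (fun kc =>
      (kc.1, match kc.2 with | [] => "" | a :: _ => PySem.Str.strip a)))
    :: pvPeel keys (cols.map (fun c => c.tail))
termination_by (cols.map List.length).sum
decreasing_by
  rename_i h
  simp only [List.all_eq_true, not_forall] at h
  obtain ⟨c, hc, hne⟩ := h
  have hmap : cols.attach.map (fun (x : Subtype (Membership.mem cols)) => (x : List String).tail) = cols.map (fun c => c.tail) := by
    rw [List.map_attach_eq_pmap, List.pmap_eq_map]
  rw [hmap]
  exact pvSumTailLt cols ⟨c, hc, by simpa [List.isEmpty_iff] using hne⟩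

def expand_stacked_row_py_alt (row : List (String × Option String)) : List (List (String × String)) :=
  if row.isEmpty then [row.map (fun p => (p.1, p.2.getD ""))]
  else if (row.any (fun p =>
      match p.2 with
      | none => false
      | some v => v.toList.contains '\n')) = false then
    -- 'if not any(...): return [row]'
    [row.map (fun p => (p.1, p.2.getD ""))]
  else
    let keys : List String := row.map (fun p => p.1)
    let cols : List (List String) := row.map (fun p =>
      match p.2 with
      | none => []
      | some v => (PySem.Str.split? v "\n").getD [])
    pvPeel keys cols

-- ===== PRECONDITION & SPEC =====
-- Pre_ excludes (a) association lists with duplicate keys, which do not represent a Python dict,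
-- and (b) rows holding a None value when no value contains a newline: there A returns [row]
-- containing None, which is not a value of the declared dict[str,str]-list type.
def Pre_expand_stacked_row_py (row : List (String × Option String)) : Prop :=
  (row.map (fun p => p.1)).Nodup ∧
  ((∃ p ∈ row, p.2 = none) →
    ∃ p ∈ row, ∃ s, p.2 = some s ∧ '\n' ∈ s.toList)
instance (row : List (String × Option String)) : Decidable (Pre_expand_stacked_row_py row) := by
  unfold Pre_expand_stacked_row_py; infer_instance

def pvWitness_expand_stacked_row_py : (List (String × Option String)) :=
  [("a", some "x\ny"), ("b", none)]

def Spec_expand_stacked_row_py (row : List (String × Option String)) (out : List (List (String × String))) : Prop := out = expand_stacked_row_py_alt row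
instance (row : List (String × Option String)) (out : List (List (String × String))) : Decidable (Spec_expand_stacked_row_py row out) := by unfold Spec_expand_stacked_row_py; infer_instance

-- ===== CLAIM (what is proved, stated in full; the proofs are below) =====
def Claim_equal_expand_stacked_row_py : Prop := ∀ (row : List (String × Option String)), Dom_expand_stacked_row_py row → Pre_expand_stacked_row_py row → Spec_expand_stacked_row_py row (expand_stacked_row_py row)

-- ===== LEMMAS AND PROOFS =====

-- str.split('\n') always yields at least one piece
theorem pvGoLen (sep : List Char) (fuel : Nat) : ∀ (l cur : List Char) (acc : List (List Char)),
    acc.length + 1 ≤ (PySem.Chars.splitOn.go sep fuel l cur acc).length := by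
  induction fuel with
  | zero => intro l cur acc; simp [PySem.Chars.splitOn.go]
  | succ n ih =>
    intro l cur acc
    cases l with
    | nil => simp [PySem.Chars.splitOn.go]
    | cons c rest =>
      rw [PySem.Chars.splitOn.go]
      split_ifs with h
      · have := ih (List.drop sep.length (c :: rest)) [] (cur.reverse :: acc); simp at this ⊢; omega
      · exact ih rest (c :: cur) acc

theorem pvSplitLen (s : String) : 1 ≤ ((PySem.Str.split? s "\n").getD []).length := by
  simp [PySem.Str.split?, PySem.Chars.split?, PySem.Chars.splitOn]
  have := pvGoLen ['\n'] (s.toList.length + 1) s.toList [] []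
  simp at this; omega

-- with no newline in l, go never splits: the result has exactly acc.length + 1 pieces
theorem pvGoNoNl (fuel : Nat) : ∀ (l cur : List Char) (acc : List (List Char)), '\n' ∉ l →
    (PySem.Chars.splitOn.go ['\n'] fuel l cur acc).length = acc.length + 1 := by
  induction fuel with
  | zero => intro l cur acc _; simp [PySem.Chars.splitOn.go]
  | succ n ih =>
    intro l cur acc hnl
    cases l with
    | nil => simp [PySem.Chars.splitOn.go]
    | cons c rest =>
      rw [PySem.Chars.splitOn.go]
      split_ifs with h
      · exfalso
        have hc : c = '\n' := by
          simp [List.isPrefixOf] at h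
          exact h.symm
        exact hnl (hc ▸ List.mem_cons_self)
      · exact ih rest (c :: cur) acc (fun hm => hnl (List.mem_cons_of_mem c hm))

-- with a newline in l and enough fuel, go splits at least once: at least acc.length + 2 pieces
theorem pvGoNl (fuel : Nat) : ∀ (l cur : List Char) (acc : List (List Char)), '\n' ∈ l → l.length < fuel →
    acc.length + 2 ≤ (PySem.Chars.splitOn.go ['\n'] fuel l cur acc).length := by
  induction fuel with
  | zero => intro l cur acc _ hlt; omega
  | succ n ih =>
    intro l cur acc hnl hlt
    cases l with
    | nil => simp at hnl
    | cons c rest =>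
      rw [PySem.Chars.splitOn.go]
      split_ifs with h
      · have := pvGoLen ['\n'] n (List.drop 1 (c :: rest)) [] (cur.reverse :: acc)
        simp at this ⊢; omega
      · have hc : c ≠ '\n' := by
          intro hcnl; subst hcnl
          exact h (by simp [List.isPrefixOf_iff_prefix])
        have hrest : '\n' ∈ rest := by
          rcases List.mem_cons.mp hnl with h' | h'
          · exact absurd h'.symm hc
          · exact h'
        exact ih rest (c :: cur) acc hrest (by simp at hlt ⊢; omega)

-- number of pieces of v.split('\n') is ≥ 2 iff v contains a newline
theorem pvSplitTwo (s : String) :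
    2 ≤ ((PySem.Str.split? s "\n").getD []).length ↔ '\n' ∈ s.toList := by
  simp only [PySem.Str.split?, PySem.Chars.split?, PySem.Chars.splitOn]
  constructor
  · intro h2
    by_contra hnl
    have := pvGoNoNl (s.toList.length + 1) s.toList [] [] hnl
    simp at this h2; omega
  · intro hnl
    have := pvGoNl (s.toList.length + 1) s.toList [] [] hnl (by omega)
    simpa using this

theorem pvFoldlMaxInit (l : List Int) (a : Int) : ∀ (b : Int), l.foldl max (max a b) = max a (l.foldl max b) := by
  induction l with
  | nil => intro b; simp
  | cons c t ih =>
    intro b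
    simp only [List.foldl_cons, max_assoc]
    exact ih (max b c)

-- foldl max is the init or a member
theorem pvFoldlMaxCases (l : List Int) : ∀ (a : Int), l.foldl max a = a ∨ l.foldl max a ∈ l := by
  induction l with
  | nil => intro a; simp
  | cons b t ih =>
    intro a
    simp only [List.foldl_cons]
    rcases ih (max a b) with h | h
    · rw [h]
      rcases max_choice a b with h' | h' <;> rw [h']
      · exact Or.inl rfl
      · exact Or.inr List.mem_cons_self
    · exact Or.inr (List.mem_cons_of_mem b h)

-- proof-side abbreviations
def pvG (p : String × Option String) : Option Int :=
  p.2.map (fun s => (((PySem.Str.split? s "\n").getD []).length : Int))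

def pvColOf (p : String × Option String) : List String :=
  match p.2 with
  | none => []
  | some v => (PySem.Str.split? v "\n").getD []

theorem pvMatchMaxFold (xs : List Int) (d : Int) (h : ∀ x ∈ xs, d ≤ x) :
    (match PySem.List.max? xs (fun x => x) with | some m => m | none => d) = xs.foldl max d := by
  cases xs with
  | nil => simp [PySem.List.max?]
  | cons x t =>
    rw [PySem.List.max?_id_cons]
    have hx : max d x = x := max_eq_right (h x List.mem_cons_self)
    simp only [List.foldl_cons, hx]

theorem pvMaxIdentity (l : List (String × Option String)) :
    max 1 ((l.map (fun p => ((pvColOf p).length : Int))).foldl max 0) = (l.filterMap pvG).foldl max 1 := by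
  induction l with
  | nil => simp
  | cons p t ih =>
    cases hp : p.2 with
    | none =>
      have hc : pvColOf p = [] := by simp [pvColOf, hp]
      have hg : pvG p = none := by simp [pvG, hp]
      simp only [List.map_cons, List.filterMap_cons, hc, hg,
        List.foldl_cons, List.length_nil, Int.natCast_zero, max_self]
      exact ih
    | some v =>
      have hc : pvColOf p = (PySem.Str.split? v "\n").getD [] := by simp [pvColOf, hp]
      have hg : pvG p = some (((PySem.Str.split? v "\n").getD []).length : Int) := by simp [pvG, hp]
      simp only [List.map_cons, List.filterMap_cons, hc, hg,
        List.foldl_cons]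
      set x : Int := (((PySem.Str.split? v "\n").getD []).length : Int) with hxdef
      have h1 : (t.map (fun p => ((pvColOf p).length : Int))).foldl max (max 0 x)
          = max x ((t.map (fun p => ((pvColOf p).length : Int))).foldl max 0) := by
        rw [max_comm 0 x, pvFoldlMaxInit]
      have h2 : (t.filterMap pvG).foldl max (max 1 x)
          = max x ((t.filterMap pvG).foldl max 1) := by
        rw [max_comm 1 x, pvFoldlMaxInit]
      rw [h1, h2, ← ih, max_left_comm]

theorem pvSplitValsEq (row : List (String × Option String)) (hnd : (row.map (fun p => p.1)).Nodup) :
    (row.map (fun p => p.1)).map (fun k =>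
      match (PySem.Dict.mk row).get? k with
      | some (some v) => (PySem.Str.split? v "\n").getD []
      | _ => []) = row.map pvColOf := by
  rw [List.map_map]
  apply List.map_congr_left
  intro p hp
  obtain ⟨k, v⟩ := p
  have hget : (PySem.Dict.mk row).get? k = some v := by
    apply PySem.Dict.get?_of_mem_items (d := PySem.Dict.mk row) hp
    simpa [PySem.Dict.keys] using hnd
  cases v with
  | none => simp [Function.comp, hget, pvColOf]
  | some s => simp [Function.comp, hget, pvColOf]

-- Nat foldl-max helpers
theorem pvLeFoldlMaxNat (l : List Nat) : ∀ (a : Nat), a ≤ l.foldl max a ∧ ∀ b ∈ l, b ≤ l.foldl max a := by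
  induction l with
  | nil => intro a; simp
  | cons c t ih =>
    intro a
    simp only [List.foldl_cons]
    obtain ⟨h1, h2⟩ := ih (max a c)
    refine ⟨le_trans (le_max_left a c) h1, ?_⟩
    intro b hb
    rcases List.mem_cons.mp hb with rfl | hb'
    · exact le_trans (le_max_right a b) h1
    · exact h2 b hb'

-- the Int max A computes equals the cast of the Nat max pvPeelEq uses
theorem pvFoldlMaxCast (l : List (List String)) : ∀ (a : Nat),
    (l.map (fun c => (c.length : Int))).foldl max (a : Int) = (((l.map List.length).foldl max a : Nat) : Int) := by
  induction l with
  | nil => intro a; simp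
  | cons c t ih =>
    intro a
    simp only [List.map_cons, List.foldl_cons]
    rw [show max (a : Int) ((c.length : Int)) = ((max a c.length : Nat) : Int) by
      rw [Nat.cast_max]]
    exact ih (max a c.length)

-- peeling one level drops the common height by one
theorem pvTailMax (l : List (List String)) : ∀ (a : Nat),
    ((l.map (fun c => c.tail)).map List.length).foldl max (a - 1) = ((l.map List.length).foldl max a) - 1 := by
  induction l with
  | nil => intro a; simp
  | cons c t ih =>
    intro a
    simp only [List.map_cons, List.foldl_cons]
    rw [show max (a - 1) c.tail.length = max a c.length - 1 by
      have : c.tail.length = c.length - 1 := by cases c <;> simp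
      omega]
    exact ih (max a c.length)

theorem pvFoldlMaxZeroNat (l : List Nat) (h : ∀ b ∈ l, b = 0) : l.foldl max 0 = 0 := by
  induction l with
  | nil => rfl
  | cons c t ih =>
    have hc : c = 0 := h c List.mem_cons_self
    simp only [List.foldl_cons, hc, Nat.max_self]
    exact ih (fun b hb => h b (List.mem_cons_of_mem c hb))

-- Nat version of pvFoldlMaxInit
theorem pvFoldlMaxInitNat (l : List Nat) (a : Nat) : ∀ (b : Nat), l.foldl max (max a b) = max a (l.foldl max b) := by
  induction l with
  | nil => intro b; simp
  | cons c t ih =>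
    intro b
    simp only [List.foldl_cons, max_assoc]
    exact ih (max b c)

-- pvPeel produces exactly the rows A indexes by i < height
theorem pvPeelEq (N : Nat) : ∀ (keys : List String) (cols : List (List String)),
    (cols.map List.length).foldl max 0 = N →
    pvPeel keys cols = (List.range N).map (fun i => (keys.zip cols).map (fun kc =>
      (kc.1, if i < kc.2.length then PySem.Str.strip (kc.2.getD i "") else ""))) := by
  induction N with
  | zero =>
    intro keys cols hN
    rw [pvPeel]
    have hall : cols.all (fun c => c.isEmpty) = true := by
      simp only [List.all_eq_true]
      intro c hc
      have := (pvLeFoldlMaxNat (cols.map List.length) 0).2 c.length (List.mem_map.mpr ⟨c, hc, rfl⟩)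
      rw [hN] at this
      simpa [List.isEmpty_iff, List.length_eq_zero_iff] using Nat.le_zero.mp this
    simp [hall]
  | succ n ih =>
    intro keys cols hN
    rw [pvPeel]
    have hall : cols.all (fun c => c.isEmpty) = false := by
      by_contra h
      have h' : cols.all (fun c => c.isEmpty) = true := by
        cases hb : cols.all (fun c => c.isEmpty)
        · exact absurd hb h
        · rfl
      have : (cols.map List.length).foldl max 0 = 0 := by
        apply pvFoldlMaxZeroNat
        intro b hb
        obtain ⟨c, hc, rfl⟩ := List.mem_map.mp hb
        have := List.all_eq_true.mp h' c hc
        simpa [List.isEmpty_iff, List.length_eq_zero_iff] using this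
      omega
    rw [hall]
    simp only [Bool.false_eq_true, if_false]
    have htails : ((cols.map (fun c => c.tail)).map List.length).foldl max 0 = n := by
      have := pvTailMax cols 1
      simp only [Nat.sub_self] at this
      rw [this]
      have h1 : (cols.map List.length).foldl max 1 = max 1 ((cols.map List.length).foldl max 0) := by
        have := pvFoldlMaxInitNat (cols.map List.length) 1 0
        simpa using this
      rw [h1, hN]
      omega
    rw [ih keys (cols.map (fun c => c.tail)) htails]
    rw [List.range_succ_eq_map]
    simp only [List.map_cons, List.map_map]
    refine congrArg₂ _ ?_ ?_
    · apply List.map_congr_left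
      intro kc _
      cases hc : kc.2 with
      | nil => simp
      | cons a t => simp
    · apply List.map_congr_left
      intro i _
      simp only [Function.comp]
      rw [List.zip_map_right, List.map_map]
      apply List.map_congr_left
      intro kc _
      simp only [Function.comp, Prod.map]
      cases hc : kc.2 with
      | nil => simp
      | cons a t => simp

-- B's guard fires exactly when A's max exceeds 1
theorem pvGuardIff (row : List (String × Option String)) :
    (row.any (fun p => match p.2 with | none => false | some v => v.toList.contains '\n')) = true
    ↔ 2 ≤ ((row.map pvColOf).map (fun c => (c.length : Int))).foldl max 0 := by
  rw [List.any_eq_true]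
  constructor
  · rintro ⟨p, hp, hpred⟩
    cases hv : p.2 with
    | none => rw [hv] at hpred; simp at hpred
    | some v =>
      rw [hv] at hpred
      have hnl : '\n' ∈ v.toList := by simpa using hpred
      have h2 : 2 ≤ (pvColOf p).length := by
        simpa [pvColOf, hv] using (pvSplitTwo v).mpr hnl
      have hmem : ((pvColOf p).length : Int) ∈ (row.map pvColOf).map (fun c => (c.length : Int)) := by
        exact List.mem_map.mpr ⟨pvColOf p, List.mem_map.mpr ⟨p, hp, rfl⟩, rfl⟩
      have := (PySem.List.le_foldl_max ((row.map pvColOf).map (fun c => (c.length : Int))) 0).2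
        _ hmem
      omega
  · intro h2
    rcases pvFoldlMaxCases ((row.map pvColOf).map (fun c => (c.length : Int))) 0 with h | h
    · omega
    · obtain ⟨c, hc, hceq⟩ := List.mem_map.mp h
      obtain ⟨p, hp, rfl⟩ := List.mem_map.mp hc
      cases hv : p.2 with
      | none =>
        exfalso
        have hnil : pvColOf p = [] := by simp [pvColOf, hv]
        rw [hnil] at hceq
        simp only [List.length_nil, Int.natCast_zero] at hceq
        omega
      | some v =>
        refine ⟨p, hp, ?_⟩
        rw [hv]
        have hcl : pvColOf p = (PySem.Str.split? v "\n").getD [] := by simp [pvColOf, hv]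
        have hnl : '\n' ∈ v.toList := by
          apply (pvSplitTwo v).mp
          rw [← hcl]
          omega
        simpa using hnl

-- A's cell formula (Int-indexed) equals B's (Nat-indexed)
theorem pvCellEq (c : List String) (k : Nat) :
    (if ((k : Int) < (c.length : Int)) then PySem.Str.strip (PySem.List.pyGetD c (k : Int) "") else "")
    = (if k < c.length then PySem.Str.strip (c.getD k "") else "") := by
  by_cases h : k < c.length
  · rw [if_pos (by exact_mod_cast h), if_pos h]
    rw [PySem.List.pyGetD_eq_getElem c "" (by positivity) (by exact_mod_cast h)]
    rw [List.getD_eq_getElem _ _ h]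
    simp
  · rw [if_neg (by exact_mod_cast h), if_neg h]

-- ===== VERDICT (by name: the statement is the Claim_ definition above) =====
theorem expand_stacked_row_py_spec : Claim_equal_expand_stacked_row_py := by
  intro row _hdom hpre
  obtain ⟨hnd, _hnone⟩ := hpre
  unfold Spec_expand_stacked_row_py
  by_cases hrow : row = []
  · subst hrow; rfl
  have hne : row.isEmpty = false := by simpa [List.isEmpty_iff] using hrow
  simp only [expand_stacked_row_py, expand_stacked_row_py_alt, hne, Bool.false_eq_true, if_false]
  have hlens : (PySem.Dict.mk row).values.filterMap (fun v =>
      v.map (fun s => (((PySem.Str.split? s "\n").getD []).length : Int)))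
      = row.filterMap pvG := by
    show ({ items := row } : PySem.Dict String (Option String)).values.filterMap _ = _
    rw [PySem.Dict.values_mk, List.filterMap_map]; rfl
  have hcols : row.map (fun p => match p.2 with
      | none => ([] : List String)
      | some v => (PySem.Str.split? v "\n").getD []) = row.map pvColOf := rfl
  rw [hlens, hcols]
  have hA : (match PySem.List.max? (row.filterMap pvG) (fun x => x) with
      | some m => m | none => (1 : Int)) = (row.filterMap pvG).foldl max 1 := by
    apply pvMatchMaxFold
    intro x hx
    obtain ⟨p, _hp, hgp⟩ := List.mem_filterMap.mp hx
    obtain ⟨sv, hs, hx'⟩ := Option.map_eq_some_iff.mp hgp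
    subst hx'
    have := pvSplitLen sv
    exact_mod_cast this
  rw [hA]
  have hMB := pvMaxIdentity row
  set C : List (List String) := row.map pvColOf with hC
  set mB : Int := (C.map (fun c => (c.length : Int))).foldl max 0 with hmB
  rw [show (row.map (fun p => ((pvColOf p).length : Int))) = C.map (fun c => (c.length : Int)) by
    rw [hC, List.map_map]; rfl] at hMB
  -- hMB : max 1 mB = (row.filterMap pvG).foldl max 1
  rw [← hMB]
  have hguardIff := pvGuardIff row
  rw [← hC] at hguardIff
  by_cases hbig : 2 ≤ mB
  · -- both expand
    have hguard : (row.any (fun p => match p.2 with | none => false | some v => v.toList.contains '\n')) = true :=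
      hguardIff.mpr hbig
    rw [hguard]
    simp only [Bool.true_eq_false, if_false]
    rw [if_neg (by omega)]
    have hmax : max 1 mB = mB := by omega
    rw [hmax]
    rw [show ({ items := row } : PySem.Dict String (Option String)).keys = row.map (fun p => p.1) from
      PySem.Dict.keys_mk row]
    rw [show (row.map (fun p => p.1)).map (fun k =>
        match ({ items := row } : PySem.Dict String (Option String)).get? k with
        | some (some v) => (PySem.Str.split? v "\n").getD []
        | _ => []) = C from pvSplitValsEq row hnd]
    set keys : List String := row.map (fun p => p.1) with hkeys
    -- heights
    set N : Nat := (C.map List.length).foldl max 0 with hNdef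
    have hcast : mB = (N : Int) := by
      rw [hmB, hNdef]
      have := pvFoldlMaxCast C 0
      simpa using this
    rw [pvPeelEq N keys C rfl]
    rw [hcast, PySem.List.pyRange_zero_natCast, List.map_map]
    apply List.map_congr_left
    intro k hk
    simp only [Function.comp]
    have hlenk : keys.length = C.length := by simp [hkeys, hC]
    apply List.ext_getElem
    · simp [PySem.List.length_enumerate, hlenk]
    intro j h1 h2
    have hj : j < C.length := by
      simpa [PySem.List.length_enumerate, hlenk] using h1
    have hjC : (j : Int) < (C.length : Int) := by exact_mod_cast hj
    simp only [List.getElem_map, PySem.List.getElem_enumerate, List.getElem_zip, zero_add]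
    rw [PySem.List.pyGetD_eq_getElem C [] (by positivity) hjC]
    refine congrArg₂ Prod.mk rfl ?_
    have := pvCellEq (C[(j : Int).toNat]'(by omega)) k
    simp only [Int.toNat_natCast] at this ⊢
    exact this
  · -- both return [row]
    have hguard : (row.any (fun p => match p.2 with | none => false | some v => v.toList.contains '\n')) = false := by
      cases hb : (row.any (fun p => match p.2 with | none => false | some v => v.toList.contains '\n'))
      · rfl
      · exact absurd (hguardIff.mp hb) hbig
    rw [hguard, if_pos (by omega)]
    simp
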